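-- pv_equiv track=rewrite | github.com/Oby-Borges/Production_Planning_Game | src/mps.py | _sequence_and_count_setups
-- ===== SOURCE A (Python) =====
-- from typing import Dict, List, Tuple
--
-- def _sequence_and_count_setups(produced_items: List[str], prev_last: str | None) -> Tuple[List[str], int, str | None]:
--     """Choose production sequence to reduce setups and count switches."""
--     if not produced_items:
--         return [], 0, prev_last
--
--     unique = list(dict.fromkeys(produced_items))
--     if prev_last in unique:
--         unique.remove(prev_last)
--         sequence = [prev_last] + unique
--     else:
--         sequence = unique
--
--     # The packet charges setup cost when switching from one smoothie to another.
--     # Starting the very first product in period 1 is not a "switch", so we only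
--     # count transitions after there is already an active setup.
--     setups = 0
--     current = prev_last
--     for item in sequence:
--         if current is not None and current != item:
--             setups += 1
--         current = item
--
--     last_item = sequence[-1]
--     return sequence, setups, last_item
-- ===== SOURCE B (Python) =====
-- def _sequence_and_count_setups(produced_items, prev_last):
--     """Same result as A, but setups computed in closed form: the sequence is
--     all-distinct, so every adjacent pair is a switch."""
--     if not produced_items:
--         return [], 0, prev_last
--     unique = list(dict.fromkeys(produced_items))
--     if prev_last in unique:
--         sequence = [prev_last] + [x for x in unique if x != prev_last]
--         setups = len(sequence) - 1
--     else:
--         sequence = unique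
--         setups = len(sequence) - 1 + (prev_last is not None)
--     return sequence, setups, sequence[-1]
-- ===== Notes on version B (the rewrite author's own statement) =====
-- stated objective: simpler
-- what changed: The per-item transition-counting loop is removed: since the built sequence is all-distinct, setups is computed in closed form as len(sequence)-1, plus 1 when prev_last is a real value absent from the deduplicated items.
import Mathlib
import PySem

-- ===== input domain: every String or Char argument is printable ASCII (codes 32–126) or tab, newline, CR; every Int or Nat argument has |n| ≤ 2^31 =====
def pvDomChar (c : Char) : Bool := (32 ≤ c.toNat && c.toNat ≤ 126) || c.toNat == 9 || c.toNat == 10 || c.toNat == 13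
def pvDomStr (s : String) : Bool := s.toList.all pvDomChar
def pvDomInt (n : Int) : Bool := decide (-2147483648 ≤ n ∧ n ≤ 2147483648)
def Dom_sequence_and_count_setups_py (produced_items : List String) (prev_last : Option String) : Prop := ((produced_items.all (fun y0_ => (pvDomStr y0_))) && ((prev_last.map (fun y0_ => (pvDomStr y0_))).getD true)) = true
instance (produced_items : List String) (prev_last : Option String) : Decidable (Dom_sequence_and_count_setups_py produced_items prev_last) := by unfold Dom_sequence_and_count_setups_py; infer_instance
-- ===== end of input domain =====

-- B replaces A's per-item transition-counting loop by a closed-form count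
-- (the sequence is all-distinct, so setups = len(sequence)-1, plus 1 when
-- prev_last is a real value absent from the deduplicated items); objective: simpler.


-- ===== PORT A =====
-- literal transliteration of _sequence_and_count_setups:
-- dedup via dict.fromkeys, move prev_last to the front if present,
-- then a fold over the sequence counting transitions from a non-None current.
def sequence_and_count_setups_py (produced_items : List String) (prev_last : Option String) : List String × Int × Option String :=
  if produced_items = [] then ([], 0, prev_last)
  else
    let unique := PySem.List.dedup produced_items
    let sequence :=
      match prev_last with
      | some p => if p ∈ unique then p :: ((PySem.List.remove? unique p).getD unique) else unique
      | none => unique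
    let setups := (sequence.foldl (fun (st : Option String × Int) item =>
        (some item,
         match st.1 with
         | some c => if c ≠ item then st.2 + 1 else st.2
         | none => st.2)) (prev_last, (0 : Int))).2
    (sequence, setups, PySem.List.pyGet? sequence (-1))

-- ===== PORT B =====
-- transliteration of Source B: same sequence construction, setups in closed form.
def sequence_and_count_setups_py_alt (produced_items : List String) (prev_last : Option String) : List String × Int × Option String :=
  if produced_items = [] then ([], 0, prev_last)
  else
    let unique := PySem.List.dedup produced_items
    match prev_last with
    | some p =>
      if p ∈ unique then
        let sequence := p :: unique.filter (fun x => x != p)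
        (sequence, (sequence.length : Int) - 1, PySem.List.pyGet? sequence (-1))
      else
        (unique, (unique.length : Int) - 1 + 1, PySem.List.pyGet? unique (-1))
    | none => (unique, (unique.length : Int) - 1, PySem.List.pyGet? unique (-1))

-- ===== PRECONDITION & SPEC =====
def Spec_sequence_and_count_setups_py (produced_items : List String) (prev_last : Option String) (out : List String × Int × Option String) : Prop := out = sequence_and_count_setups_py_alt produced_items prev_last
instance (produced_items : List String) (prev_last : Option String) (out : List String × Int × Option String) : Decidable (Spec_sequence_and_count_setups_py produced_items prev_last out) := by unfold Spec_sequence_and_count_setups_py; infer_instance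

-- ===== CLAIM (what is proved, stated in full; the proofs are below) =====
def Claim_equal_sequence_and_count_setups_py : Prop := ∀ (produced_items : List String) (prev_last : Option String), Dom_sequence_and_count_setups_py produced_items prev_last → Spec_sequence_and_count_setups_py produced_items prev_last (sequence_and_count_setups_py produced_items prev_last)

-- ===== LEMMAS AND PROOFS =====

-- the transition count of A's loop, with the running accumulator factored out
def pvCountS : Option String → List String → Int
  | _, [] => 0
  | c, x :: xs =>
    (match c with
     | some c' => if c' ≠ x then (1 : Int) else 0
     | none => 0) + pvCountS (some x) xs

lemma pvFold_eq_countS (l : List String) (c : Option String) (s : Int) :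
    (l.foldl (fun (st : Option String × Int) item =>
        (some item,
         match st.1 with
         | some c => if c ≠ item then st.2 + 1 else st.2
         | none => st.2)) (c, s)).2 = s + pvCountS c l := by
  induction l generalizing c s with
  | nil => simp [pvCountS]
  | cons x xs ih =>
    simp only [List.foldl_cons, pvCountS]
    rw [ih]
    cases c with
    | none => simp
    | some c' =>
      show (if c' ≠ x then s + 1 else s) + pvCountS (some x) xs
          = s + ((if c' ≠ x then (1:Int) else 0) + pvCountS (some x) xs)
      by_cases h : c' = x
      · simp [h]
      · simp [h]; ring

lemma pvCountS_of_notMem (c : String) (l : List String) (hc : c ∉ l) (hl : l.Nodup) :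
    pvCountS (some c) l = (l.length : Int) := by
  induction l generalizing c with
  | nil => simp [pvCountS]
  | cons x xs ih =>
    have hcx : c ≠ x := by intro h; exact hc (h ▸ List.mem_cons_self)
    have hx : x ∉ xs := (List.nodup_cons.mp hl).1
    have hxs : xs.Nodup := (List.nodup_cons.mp hl).2
    simp [pvCountS, hcx, ih x hx hxs]
    omega

lemma pvDedup_ne_nil (xs : List String) (h : xs ≠ []) : PySem.List.dedup xs ≠ [] := by
  cases xs with
  | nil => exact absurd rfl h
  | cons x t =>
    intro he
    have hx : x ∈ PySem.List.dedup (x :: t) := by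
      rw [PySem.List.mem_dedup]; exact List.mem_cons_self
    rw [he] at hx
    exact (List.not_mem_nil) hx

-- ===== VERDICT (by name: the statement is the Claim_ definition above) =====
theorem sequence_and_count_setups_py_spec : Claim_equal_sequence_and_count_setups_py := by
  intro pis pl _
  unfold Spec_sequence_and_count_setups_py sequence_and_count_setups_py sequence_and_count_setups_py_alt
  by_cases hnil : pis = []
  · simp [hnil]
  · simp only [hnil, if_false]
    have hud : (PySem.List.dedup pis).Nodup := PySem.List.nodup_dedup pis
    have hune : PySem.List.dedup pis ≠ [] := pvDedup_ne_nil pis hnil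
    set u := PySem.List.dedup pis with hu
    cases pl with
    | none =>
      simp only
      rw [pvFold_eq_countS]
      obtain ⟨x, xs, hxx⟩ := List.exists_cons_of_ne_nil hune
      rw [hxx] at hud ⊢
      have hx : x ∉ xs := (List.nodup_cons.mp hud).1
      have hxs : xs.Nodup := (List.nodup_cons.mp hud).2
      simp [pvCountS, pvCountS_of_notMem x xs hx hxs]
    | some p =>
      by_cases hp : p ∈ u
      · have herase : PySem.List.remove? u p = some (u.erase p) :=
          PySem.List.remove?_eq_some_erase u p hp
        have hfil : u.erase p = u.filter (fun x => x != p) :=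
          List.Nodup.erase_eq_filter hud p
        simp only [hp, if_true, herase, Option.getD_some, hfil]
        rw [pvFold_eq_countS]
        have hpnot : p ∉ u.filter (fun x => x != p) := by
          intro hmem
          have := (List.mem_filter.mp hmem).2
          simp at this
        have hfnd : (u.filter (fun x => x != p)).Nodup := hud.filter _
        have hlen : (u.filter (fun x => x != p)).length + 1 = u.length := by
          rw [← hfil]
          exact List.length_erase_of_mem hp ▸ (Nat.succ_pred_eq_of_pos (List.length_pos_of_mem hp))
        simp only [pvCountS, pvCountS_of_notMem p _ hpnot hfnd]
        simp
      · simp only [hp, if_false]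
        rw [pvFold_eq_countS]
        rw [pvCountS_of_notMem p u hp hud]
        simp
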